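-- pv_equiv track=rewrite | github.com/YHT97/math_IDZ | Gauss.py | q_func_f
-- ===== SOURCE A (Python) =====
-- def q_func_f(q, n):
--     result = q
--     count = 1
--     i = 1
--     while i < n:
--         if i % 2 != 0:
--             result *= (q - count)
--         else:
--             result *= (q + count)
--             count += 1
--         i += 1
--     return result
-- ===== SOURCE B (Python) =====
-- def q_func_f(q, n):
--     # Pair up consecutive (q-k)(q+k) factors into q*q - k*k; handle a
--     # trailing unpaired (q - k) factor when n is even.
--     if n <= 1:
--         return q
--     m = n - 1
--     half = m // 2
--     r = q
--     for k in range(1, half + 1):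
--         r *= q * q - k * k
--     if m % 2 != 0:
--         r *= q - (half + 1)
--     return r
-- ===== Notes on version B (the rewrite author's own statement) =====
-- stated objective: alternative
-- what changed: Replaces the stateful while-loop with its i%2 branch and count counter by a closed-form factorisation: the paired factors (q-k)(q+k) are combined into q*q-k*k and multiplied in one simple for-loop, with the single trailing unpaired factor handled once after the loop.
import Mathlib
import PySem

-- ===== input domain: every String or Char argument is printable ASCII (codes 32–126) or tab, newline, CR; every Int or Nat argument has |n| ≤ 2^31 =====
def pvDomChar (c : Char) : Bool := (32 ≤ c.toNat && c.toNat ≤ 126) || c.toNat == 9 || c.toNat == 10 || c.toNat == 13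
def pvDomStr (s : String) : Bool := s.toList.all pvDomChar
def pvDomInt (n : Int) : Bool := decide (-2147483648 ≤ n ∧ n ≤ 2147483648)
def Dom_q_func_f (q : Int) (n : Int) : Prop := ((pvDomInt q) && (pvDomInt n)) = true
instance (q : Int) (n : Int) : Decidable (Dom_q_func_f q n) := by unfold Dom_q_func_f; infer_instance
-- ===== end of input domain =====

-- B replaces A's stateful while-loop (i%2 branch + count counter) by pairing
-- consecutive factors into q*q-k*k, multiplied in one simple for-loop (alternative decomposition).

-- ===== PORT A =====
-- while i < n: the loop runs exactly (n-1).toNat times (i goes 1,2,…,n-1)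
def qloopA (q : Int) : Nat → Int → Int → Int → Int
  | 0, result, _, _ => result
  | fuel+1, result, count, i =>
      if i % 2 ≠ 0 then qloopA q fuel (result * (q - count)) count (i+1)
      else qloopA q fuel (result * (q + count)) (count+1) (i+1)

def q_func_f (q : Int) (n : Int) : Int := qloopA q (n-1).toNat q 1 1

-- ===== PORT B =====
def q_func_f_alt (q : Int) (n : Int) : Int :=
  if n ≤ 1 then q
  else
    let m := n - 1
    let half := PySem.Int.floordiv m 2
    let r := (PySem.List.pyRange 1 (half+1) 1).foldl (fun r k => r * (q*q - k*k)) q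
    if PySem.Int.mod m 2 ≠ 0 then r * (q - (half + 1)) else r

-- ===== PRECONDITION & SPEC =====
def Spec_q_func_f (q : Int) (n : Int) (out : Int) : Prop := out = q_func_f_alt q n
instance (q : Int) (n : Int) (out : Int) : Decidable (Spec_q_func_f q n out) := by unfold Spec_q_func_f; infer_instance

-- ===== CLAIM (what is proved, stated in full; the proofs are below) =====
def Claim_equal_q_func_f : Prop := ∀ (q : Int) (n : Int), Dom_q_func_f q n → Spec_q_func_f q n (q_func_f q n)

-- ===== LEMMAS AND PROOFS =====

-- proof-only intermediate form of A's loop, consuming two iterations at a time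
def pvF (q : Int) : Nat → Int → Int → Int
  | 0, r, _ => r
  | 1, r, c => r * (q - c)
  | (m+2), r, c => pvF q m (r * (q - c) * (q + c)) (c+1)

theorem qloopA_eq_pvF (q : Int) (m : Nat) :
    ∀ (r c s : Int), qloopA q m r c (2*s+1) = pvF q m r c := by
  induction m using Nat.strong_induction_on with
  | _ m ih =>
    match m with
    | 0 => intro r c s; rfl
    | 1 =>
      intro r c s
      have h1 : (2*s+1) % 2 ≠ 0 := by omega
      simp [qloopA, pvF]
    | m+2 =>
      intro r c s
      have h1 : (2*s+1) % 2 ≠ 0 := by omega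
      have h2 : (2*s+1+1) % 2 = 0 := by omega
      have h3 : (2*s+1+1+1) = 2*(s+1)+1 := by ring
      simp only [qloopA, h1, h2, if_pos, if_neg, ne_eq, not_true_eq_false,
        not_false_eq_true]
      rw [h3, ih m (by omega)]
      rfl

theorem pvF_eq_fold (q : Int) (m : Nat) :
    ∀ (r c : Int), pvF q m r c =
      (PySem.List.pyRange c (c + (m/2 : Nat)) 1).foldl (fun r k => r * (q*q - k*k)) r *
        (if m % 2 = 1 then q - (c + (m/2 : Nat)) else 1) := by
  induction m using Nat.strong_induction_on with
  | _ m ih =>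
    match m with
    | 0 =>
      intro r c
      simp [pvF]
    | 1 =>
      intro r c
      simp [pvF]
    | m+2 =>
      intro r c
      have hc : ((m+2)/2 : Nat) = (m/2 : Nat) + 1 := by omega
      have hmod : (m+2) % 2 = m % 2 := by omega
      have hlt : c < c + (((m+2)/2 : Nat) : Int) := by
        rw [hc]; push_cast; omega
      show pvF q m (r * (q - c) * (q + c)) (c+1) = _
      rw [ih m (by omega), PySem.List.pyRange_one_cons hlt, hmod]
      have hend : c + (((m+2)/2 : Nat) : Int) = (c+1) + ((m/2 : Nat) : Int) := by
        rw [hc]; push_cast; ring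
      rw [hend]
      simp only [List.foldl_cons]
      have : r * (q - c) * (q + c) = r * (q*q - c*c) := by ring
      rw [this]

theorem q_func_f_eq (q n : Int) : q_func_f q n = q_func_f_alt q n := by
  unfold q_func_f q_func_f_alt
  by_cases h : n ≤ 1
  · have : (n-1).toNat = 0 := by omega
    simp [this, qloopA, h]
  · simp only [h, ite_false]
    have h1 : n - 1 = ((n-1).toNat : Int) := by omega
    set M : Nat := (n-1).toNat with hM
    have hdiv : PySem.Int.floordiv (n-1) 2 = ((M/2 : Nat) : Int) := by
      simp [PySem.Int.floordiv, h1, Int.fdiv_eq_ediv]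
    have hmod : PySem.Int.mod (n-1) 2 = ((M % 2 : Nat) : Int) := by
      simp [PySem.Int.mod, h1, Int.fmod_eq_emod]
    have key := qloopA_eq_pvF q M q 1 0
    norm_num at key
    rw [key, pvF_eq_fold q M q 1, hdiv, hmod,
      show (1:Int) + ((M/2 : Nat) : Int) = ((M/2 : Nat) : Int) + 1 from by ring]
    by_cases hp : M % 2 = 1
    · simp [hp]
    · have h0 : M % 2 = 0 := by omega
      simp [h0]

-- ===== VERDICT (by name: the statement is the Claim_ definition above) =====
theorem q_func_f_spec : Claim_equal_q_func_f := by
  intro q n _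
  unfold Spec_q_func_f
  exact q_func_f_eq q n
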